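-- pv_equiv track=rewrite | github.com/newcanvas/HSP | 8z/task5.py | massdriver
-- ===== SOURCE A (Python) =====
-- def massdriver(activate: list) -> int:
--
--     nums = {}
--     repeats = []
--
--     for i in range(len(activate)):
--         if activate[i] in nums and nums[activate[i]] not in repeats:
--             repeats.append(nums[activate[i]])
--         elif activate[i] not in nums:
--             nums[activate[i]] = i
--
--     if repeats:
--         return min(repeats)
--
--     return -1
-- ===== SOURCE B (Python) =====
-- def massdriver(activate: list) -> int:
--     counts = {}
--     for x in activate:
--         counts[x] = counts.get(x, 0) + 1
--     for i, x in enumerate(activate):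
--         if counts[x] > 1:
--             return i
--     return -1
-- ===== Notes on version B (the rewrite author's own statement) =====
-- stated objective: faster
-- what changed: Replaces A's single-pass incremental first-index dict plus repeats-list (with a linear membership test inside the loop) plus final min() with a two-pass count-then-scan: build a frequency table, then return the first index whose element occurs more than once.
import Mathlib
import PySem

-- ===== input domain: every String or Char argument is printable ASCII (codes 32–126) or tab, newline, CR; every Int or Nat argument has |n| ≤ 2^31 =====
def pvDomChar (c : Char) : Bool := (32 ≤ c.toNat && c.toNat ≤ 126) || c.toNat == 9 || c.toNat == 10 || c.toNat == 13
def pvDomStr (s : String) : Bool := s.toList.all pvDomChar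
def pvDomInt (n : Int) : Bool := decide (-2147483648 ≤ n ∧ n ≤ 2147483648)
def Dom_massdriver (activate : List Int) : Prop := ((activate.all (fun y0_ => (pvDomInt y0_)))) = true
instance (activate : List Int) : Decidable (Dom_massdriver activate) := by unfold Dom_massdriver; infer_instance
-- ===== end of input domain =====

-- B replaces A's incremental first-index dict + repeats list + min() bookkeeping with a
-- two-pass count-then-scan (frequency table, then first index whose element is duplicated);
-- objective: faster (a timing run measured B faster; A scans the repeats list inside its loop).

-- ===== PORT A =====
-- literal port of A: loop over range(len(activate)) maintaining (nums, repeats); indices from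
-- pyRange are always in range, so activate[i] is pyGetD activate i 0 (exact here).
def massdriver (activate : List Int) : Int :=
  let st := (PySem.List.pyRange 0 (activate.length : Int) 1).foldl
    (fun (st : PySem.Dict Int Int × List Int) i =>
      let x := PySem.List.pyGetD activate i 0
      if st.1.contains x && !(st.2.contains (st.1.getD x 0)) then
        (st.1, st.2 ++ [st.1.getD x 0])
      else if !(st.1.contains x) then
        (st.1.insert x i, st.2)
      else st)
    (PySem.Dict.empty, [])
  match PySem.List.min? st.2 (fun y => y) with
  | some m => m
  | none => -1

-- ===== PORT B =====
-- literal port of Source B: build the frequency dict, then scan enumerate(activate) for the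
-- first index whose element has count > 1 (the early-return loop is find?).
def massdriver_alt (activate : List Int) : Int :=
  let counts := activate.foldl (fun d x => d.insert x (d.getD x 0 + 1))
    (PySem.Dict.empty : PySem.Dict Int Int)
  match (PySem.List.enumerate activate 0).find? (fun p => decide (1 < counts.getD p.2 0)) with
  | some p => p.1
  | none => -1

-- ===== PRECONDITION & SPEC =====
def Spec_massdriver (activate : List Int) (out : Int) : Prop := out = massdriver_alt activate
instance (activate : List Int) (out : Int) : Decidable (Spec_massdriver activate out) := by unfold Spec_massdriver; infer_instance

-- ===== CLAIM (what is proved, stated in full; the proofs are below) =====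
def Claim_equal_massdriver : Prop := ∀ (activate : List Int), Dom_massdriver activate → Spec_massdriver activate (massdriver activate)

-- ===== LEMMAS AND PROOFS =====

-- A's loop body, over (index, value) pairs
def pvStep (st : PySem.Dict Int Int × List Int) (p : Int × Int) : PySem.Dict Int Int × List Int :=
  if st.1.contains p.2 && !(st.2.contains (st.1.getD p.2 0)) then
    (st.1, st.2 ++ [st.1.getD p.2 0])
  else if !(st.1.contains p.2) then
    (st.1.insert p.2 p.1, st.2)
  else st

-- A's loop state after processing the whole list
def pvSt (l : List Int) : PySem.Dict Int Int × List Int :=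
  (PySem.List.enumerate l 0).foldl pvStep (PySem.Dict.empty, [])

lemma massdriver_eq_min (a : List Int) :
    massdriver a = match PySem.List.min? (pvSt a).2 (fun y => y) with
      | some m => m | none => -1 := by
  rw [massdriver, pvSt, PySem.List.enumerate_eq_map_pyRange a 0, List.foldl_map]
  rfl

lemma pvSt_append (l : List Int) (x : Int) :
    pvSt (l ++ [x]) = pvStep (pvSt l) ((l.length : Int), x) := by
  rw [pvSt, PySem.List.enumerate_append, List.foldl_append]
  simp [PySem.List.enumerate, pvSt]

lemma pvCountApp (l : List Int) (x v : Int) :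
    (l ++ [x]).count v = l.count v + if v = x then 1 else 0 := by
  by_cases h : v = x
  · simp [List.count_append, h]
  · simp only [List.count_append, List.count_singleton]
    simp only [beq_iff_eq, if_neg (fun hh : x = v => h hh.symm)]
    rw [if_neg h]

-- the membership condition the repeats list satisfies
def pvReps (l : List Int) (j : Int) : Prop :=
  ∃ k : Nat, j = (k : Int) ∧ ∃ v, PySem.List.index? l v = some k ∧ 2 ≤ l.count v

lemma pvReps_append_iff {l : List Int} {x : Int} {k0 : Nat}
    (hx : x ∈ l) (hk0 : PySem.List.index? l x = some k0) (j : Int) :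
    pvReps (l ++ [x]) j ↔ pvReps l j ∨ j = (k0 : Int) := by
  have hidx : ∀ v, PySem.List.index? (l ++ [x]) v = PySem.List.index? l v := by
    intro v
    by_cases hv : v ∈ l
    · exact PySem.List.index?_append_of_mem _ hv
    · have hvx : v ≠ x := fun h => hv (h ▸ hx)
      rw [(PySem.List.index?_eq_none_iff _ _).mpr hv,
          (PySem.List.index?_eq_none_iff _ _).mpr (by simp [hv, hvx])]
  constructor
  · rintro ⟨k, hj, v, hiv, hcv⟩
    by_cases hvx : v = x
    · subst hvx
      right
      rw [hidx, hk0] at hiv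
      obtain rfl := Option.some_inj.mp hiv
      exact hj
    · left
      refine ⟨k, hj, v, by rwa [hidx] at hiv, ?_⟩
      rwa [pvCountApp, if_neg hvx, Nat.add_zero] at hcv
  · rintro (⟨k, hj, v, hiv, hcv⟩ | hj)
    · refine ⟨k, hj, v, by rw [hidx]; exact hiv, ?_⟩
      rw [pvCountApp]
      omega
    · refine ⟨k0, hj, x, by rw [hidx]; exact hk0, ?_⟩
      have h1 : 1 ≤ l.count x := List.one_le_count_iff.mpr hx
      rw [pvCountApp, if_pos rfl]
      omega

lemma pvInv (l : List Int) :
    (∀ v, (pvSt l).1.get? v = (PySem.List.index? l v).map (fun k => (k : Int)))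
    ∧ (∀ j : Int, j ∈ (pvSt l).2 ↔ pvReps l j) := by
  induction l using List.reverseRecOn with
  | nil =>
    constructor
    · intro v
      rw [(PySem.List.index?_eq_none_iff ([] : List Int) v).mpr (by simp)]
      simp [pvSt, PySem.List.enumerate, PySem.Dict.get?_empty]
    · intro j
      simp only [pvSt, PySem.List.enumerate, List.foldl_nil, List.not_mem_nil, false_iff]
      rintro ⟨k, hj, v, hiv, _⟩
      rw [(PySem.List.index?_eq_none_iff _ _).mpr (by simp)] at hiv
      simp at hiv
  | append_singleton l x ih =>
    obtain ⟨ih1, ih2⟩ := ih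
    rw [pvSt_append]
    by_cases hx : x ∈ l
    · obtain ⟨k0, hk0⟩ : ∃ k0, PySem.List.index? l x = some k0 := by
        exact Option.isSome_iff_exists.mp ((PySem.List.index?_isSome_iff l x).mpr hx)
      have hget : (pvSt l).1.get? x = some (k0 : Int) := by rw [ih1, hk0]; rfl
      have hcont : (pvSt l).1.contains x = true := by
        rw [PySem.Dict.contains_eq_isSome_get?, hget]; rfl
      have hgetD : (pvSt l).1.getD x 0 = (k0 : Int) := by
        rw [PySem.Dict.getD_eq_get?_getD, hget]
        rfl
      have hidx : ∀ v, PySem.List.index? (l ++ [x]) v = PySem.List.index? l v := by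
        intro v
        by_cases hv : v ∈ l
        · exact PySem.List.index?_append_of_mem _ hv
        · have hvx : v ≠ x := fun h => hv (h ▸ hx)
          rw [(PySem.List.index?_eq_none_iff _ _).mpr hv,
              (PySem.List.index?_eq_none_iff _ _).mpr (by simp [hv, hvx])]
      by_cases hrep : (k0 : Int) ∈ (pvSt l).2
      · -- repeats already holds the first index: state unchanged
        have hstep : pvStep (pvSt l) ((l.length : Int), x) = pvSt l := by
          unfold pvStep
          simp [hcont, hgetD, hrep]
        rw [hstep]
        refine ⟨fun v => by rw [hidx]; exact ih1 v, fun j => ?_⟩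
        rw [pvReps_append_iff hx hk0]
        constructor
        · intro hj; exact Or.inl ((ih2 j).mp hj)
        · rintro (hj | hj)
          · exact (ih2 j).mpr hj
          · rwa [hj]
      · -- first index appended to repeats
        have hstep : pvStep (pvSt l) ((l.length : Int), x)
            = ((pvSt l).1, (pvSt l).2 ++ [(k0 : Int)]) := by
          unfold pvStep
          simp [hcont, hgetD, hrep]
        rw [hstep]
        refine ⟨fun v => by rw [hidx]; exact ih1 v, fun j => ?_⟩
        rw [pvReps_append_iff hx hk0]
        simp only [List.mem_append, List.mem_singleton]
        exact or_congr (ih2 j) Iff.rfl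
    · -- fresh value: recorded in nums
      have hnone : PySem.List.index? l x = none :=
        (PySem.List.index?_eq_none_iff _ _).mpr hx
      have hget : (pvSt l).1.get? x = none := by rw [ih1, hnone]; rfl
      have hcont : (pvSt l).1.contains x = false := by
        rw [PySem.Dict.contains_eq_isSome_get?, hget]; rfl
      have hstep : pvStep (pvSt l) ((l.length : Int), x)
          = ((pvSt l).1.insert x (l.length : Int), (pvSt l).2) := by
        unfold pvStep
        simp [hcont]
      rw [hstep]
      constructor
      · intro v
        rw [PySem.Dict.get?_insert]
        by_cases hvx : v = x
        · subst hvx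
          rw [if_pos rfl, PySem.List.index?_append_singleton_self l v hx]
          rfl
        · rw [if_neg hvx, ih1]
          by_cases hv : v ∈ l
          · rw [PySem.List.index?_append_of_mem _ hv]
          · rw [(PySem.List.index?_eq_none_iff _ _).mpr hv,
                (PySem.List.index?_eq_none_iff _ _).mpr (by simp [hv, hvx])]
      · intro j
        rw [ih2 j]
        have hcx : l.count x = 0 := List.count_eq_zero.mpr hx
        constructor
        · rintro ⟨k, hj, v, hiv, hcv⟩
          have hv : v ∈ l := (PySem.List.index?_isSome_iff l v).mp (by rw [hiv]; rfl)
          have hvx : v ≠ x := fun h => hx (h ▸ hv)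
          refine ⟨k, hj, v, by rw [PySem.List.index?_append_of_mem _ hv]; exact hiv, ?_⟩
          rw [pvCountApp]
          omega
        · rintro ⟨k, hj, v, hiv, hcv⟩
          by_cases hvx : v = x
          · subst hvx
            rw [pvCountApp, if_pos rfl, hcx] at hcv
            omega
          · by_cases hv : v ∈ l
            · refine ⟨k, hj, v, by rwa [PySem.List.index?_append_of_mem _ hv] at hiv, ?_⟩
              rwa [pvCountApp, if_neg hvx, Nat.add_zero] at hcv
            · rw [(PySem.List.index?_eq_none_iff _ _).mpr (by simp [hv, hvx])] at hiv
              simp at hiv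

lemma alt_eq (a : List Int) :
    massdriver_alt a
      = match (PySem.List.enumerate a 0).find?
          (fun p => decide (1 < (a.count p.2 : Int))) with
        | some p => p.1 | none => -1 := by
  show (match (PySem.List.enumerate a 0).find?
          (fun p => decide (1 < (a.foldl (fun d x => d.insert x (d.getD x 0 + 1))
            (PySem.Dict.empty : PySem.Dict Int Int)).getD p.2 0)) with
        | some p => p.1 | none => -1) = _
  have hfun : (fun p : Int × Int => decide (1 < (a.foldl (fun d x => d.insert x (d.getD x 0 + 1))
      (PySem.Dict.empty : PySem.Dict Int Int)).getD p.2 0)) = fun p => decide (1 < (a.count p.2 : Int)) := by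
    funext p
    rw [PySem.Dict.getD_foldl_insert_add_one a PySem.Dict.empty p.2,
      PySem.Dict.getD_empty, zero_add]
  rw [hfun]

-- ===== VERDICT (by name: the statement is the Claim_ definition above) =====
theorem massdriver_spec : Claim_equal_massdriver := by
  intro a _
  unfold Spec_massdriver
  rw [massdriver_eq_min, alt_eq]
  obtain ⟨_, ih2⟩ := pvInv a
  -- first index of a duplicated value is itself the index of a duplicated element
  have hfirst : ∀ ki : Nat, ∀ hki : ki < a.length, 2 ≤ a.count a[ki] →
      ∃ k1 : Nat, (k1 : Int) ∈ (pvSt a).2 ∧ k1 ≤ ki := by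
    intro ki hki hc
    obtain ⟨k1, hk1⟩ : ∃ k1, PySem.List.index? a a[ki] = some k1 :=
      Option.isSome_iff_exists.mp
        ((PySem.List.index?_isSome_iff a _).mpr (List.getElem_mem hki))
    obtain ⟨hk1lt, hk1v, hk1min⟩ := PySem.List.getElem_of_index?_eq_some hk1
    have hle : k1 ≤ ki := by
      by_contra h
      exact hk1min ki (by omega) rfl
    exact ⟨k1, (ih2 _).mpr ⟨k1, rfl, a[ki], hk1, by rwa [← hk1v] at hc ⊢⟩, hle⟩
  cases hf : (PySem.List.enumerate a 0).find? (fun p => decide (1 < (a.count p.2 : Int))) with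
  | none =>
    have hnone : ∀ p ∈ PySem.List.enumerate a 0, ¬ (1 < (a.count p.2 : Int)) := by
      intro p hp
      simpa using List.find?_eq_none.mp hf p hp
    cases hm : PySem.List.min? (pvSt a).2 (fun y => y) with
    | none => rfl
    | some m =>
      exfalso
      obtain ⟨km, hmk, v, hiv, hcv⟩ := (ih2 m).mp (PySem.List.min?_mem hm)
      obtain ⟨hkm, hvk, _⟩ := PySem.List.getElem_of_index?_eq_some hiv
      refine hnone ((0 : Int) + km, a[km])
        ((PySem.List.mem_enumerate_iff _ _ _).mpr ⟨km, hkm, rfl⟩) ?_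
      rw [hvk]
      exact_mod_cast hcv
  | some p =>
    obtain ⟨hq, ki, hki, hpe, hno⟩ := (List.find?_eq_some_iff_getElem).mp hf
    have hki' : ki < a.length := by simpa using hki
    rw [PySem.List.getElem_enumerate] at hpe
    have hcki : 2 ≤ a.count (a[ki]'hki') := by
      rw [← hpe] at hq
      simp only [decide_eq_true_eq] at hq
      exact_mod_cast hq
    obtain ⟨k1, hk1mem, hk1le⟩ := hfirst ki hki' hcki
    cases hm : PySem.List.min? (pvSt a).2 (fun y => y) with
    | none =>
      exact absurd hk1mem (by rw [(PySem.List.min?_eq_none_iff _ _).mp hm]; simp)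
    | some m =>
      obtain ⟨km, hmk, v, hiv, hcv⟩ := (ih2 m).mp (PySem.List.min?_mem hm)
      obtain ⟨hkm, hvk, _⟩ := PySem.List.getElem_of_index?_eq_some hiv
      -- ki ≤ km: positions before ki fail the duplicate test
      have hkikm : ki ≤ km := by
        by_contra h
        have := hno km (by simpa using (by omega : km < ki))
        rw [PySem.List.getElem_enumerate] at this
        simp only [] at this
        rw [hvk] at this
        have : ¬ (1 < (a.count v : Int)) := by simpa using this
        exact this (by exact_mod_cast hcv)
      -- m ≤ k1 ≤ ki and ki ≤ km = m
      have hmle : m ≤ (k1 : Int) := PySem.List.min?_isMin hm _ hk1mem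
      rw [← hpe]
      simp only [zero_add]
      omega
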